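-- pv_equiv track=rewrite | github.com/amaha7984/DeepLearning-Projects | Coding/CodeSignal/lists/shuffling_array_elements.py | shuffle_array
-- ===== SOURCE A (Python) =====
-- def shuffle_array(nums, k):
--     n = len(nums)
--     if n == 0 or k <= 1:
--         return nums
--
--     moved = 0            # how many elements already moved to the end
--     i = k - 1            # first k-th (0-based)
--
--     while i < n - moved:
--         nums.append(nums.pop(i))   # move k-th to end (keeps order)
--         moved += 1
--         i += (k - 1)               # next k-th in the remaining prefix
--
--     return nums
-- ===== SOURCE B (Python) =====
-- def shuffle_array(nums, k):
--     if k <= 1: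
--         return nums
--     kept = [x for i, x in enumerate(nums) if (i + 1) % k != 0]
--     moved = [x for i, x in enumerate(nums) if (i + 1) % k == 0]
--     nums[:] = kept + moved
--     return nums
-- ===== Notes on version B (the rewrite author's own statement) =====
-- stated objective: simpler
-- what changed: Replaces the in-place pop/append while-loop over a shrinking prefix with a direct partition of the list by original index: elements whose 1-based index is not divisible by k, followed by those whose index is.
import Mathlib
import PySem

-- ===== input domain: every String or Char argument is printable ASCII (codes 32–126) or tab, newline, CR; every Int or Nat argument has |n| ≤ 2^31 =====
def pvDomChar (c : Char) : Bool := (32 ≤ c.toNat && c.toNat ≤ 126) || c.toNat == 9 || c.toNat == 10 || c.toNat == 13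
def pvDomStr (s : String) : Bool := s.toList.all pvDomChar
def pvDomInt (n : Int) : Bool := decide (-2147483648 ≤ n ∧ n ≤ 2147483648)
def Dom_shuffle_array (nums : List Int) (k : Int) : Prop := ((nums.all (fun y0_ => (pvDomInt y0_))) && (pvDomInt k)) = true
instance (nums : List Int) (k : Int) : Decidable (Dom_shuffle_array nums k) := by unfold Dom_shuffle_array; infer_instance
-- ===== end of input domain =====

-- B replaces A's pop/append while-loop by a direct partition of the list on the original
-- 1-based index's divisibility by k; the equivalence proved is about the RETURN value
-- (in Python both A and B also mutate `nums` in place).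

-- ===== PORT A =====
-- A's while-loop: fuel only makes the recursion total; nums.length + 1 iterations always suffice.
def shuffleLoopA (k n : Int) : Nat → List Int → Int → Int → List Int
  | 0, nums, _, _ => nums
  | fuel + 1, nums, moved, i =>
    if i < n - moved then
      match PySem.List.pop? nums i with
      | some (x, rest) => shuffleLoopA k n fuel (rest ++ [x]) (moved + 1) (i + (k - 1))
      | none => nums
    else nums

def shuffle_array (nums : List Int) (k : Int) : List Int :=
  let n : Int := nums.length
  if n = 0 ∨ k ≤ 1 then nums
  else shuffleLoopA k n (nums.length + 1) nums 0 (k - 1)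

-- ===== PORT B =====
def shuffle_array_alt (nums : List Int) (k : Int) : List Int :=
  if k ≤ 1 then nums
  else
    let kept := ((PySem.List.enumerate nums 0).filter
      (fun p => !(PySem.Int.mod (p.1 + 1) k == 0))).map Prod.snd
    let moved := ((PySem.List.enumerate nums 0).filter
      (fun p => PySem.Int.mod (p.1 + 1) k == 0)).map Prod.snd
    kept ++ moved

-- ===== PRECONDITION & SPEC =====
def Spec_shuffle_array (nums : List Int) (k : Int) (out : List Int) : Prop := out = shuffle_array_alt nums k
instance (nums : List Int) (k : Int) (out : List Int) : Decidable (Spec_shuffle_array nums k out) := by unfold Spec_shuffle_array; infer_instance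

-- ===== CLAIM (what is proved, stated in full; the proofs are below) =====
def Claim_equal_shuffle_array : Prop := ∀ (nums : List Int) (k : Int), Dom_shuffle_array nums k → Spec_shuffle_array nums k (shuffle_array nums k)

-- ===== LEMMAS AND PROOFS =====

-- Proof-side characterisation: kepF/movF walk the list with a countdown counter c,
-- skipping (resp. selecting) every element whose relative position is c, c+K, c+2K, …
def kepF (K : Nat) : List Int → Nat → List Int
  | [], _ => []
  | _ :: xs, 0 => kepF K xs (K - 1)
  | x :: xs, c + 1 => x :: kepF K xs c

def movF (K : Nat) : List Int → Nat → List Int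
  | [], _ => []
  | x :: xs, 0 => x :: movF K xs (K - 1)
  | _ :: xs, c + 1 => movF K xs c

lemma kepF_all (K : Nat) : ∀ (xs : List Int) (c : Nat), xs.length ≤ c → kepF K xs c = xs := by
  intro xs
  induction xs with
  | nil => intro c _; rfl
  | cons x xs ih =>
    intro c hc
    cases c with
    | zero => simp at hc
    | succ c => simp [kepF, ih c (by simpa using hc)]

lemma movF_all (K : Nat) : ∀ (xs : List Int) (c : Nat), xs.length ≤ c → movF K xs c = [] := by
  intro xs
  induction xs with
  | nil => intro c _; rfl
  | cons x xs ih =>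
    intro c hc
    cases c with
    | zero => simp at hc
    | succ c => simp [movF, ih c (by simpa using hc)]

lemma kepF_append_le (K : Nat) : ∀ (P S : List Int) (c : Nat), P.length ≤ c →
    kepF K (P ++ S) c = P ++ kepF K S (c - P.length) := by
  intro P
  induction P with
  | nil => intro S c _; simp
  | cons x P ih =>
    intro S c hc
    cases c with
    | zero => simp at hc
    | succ c =>
      simp only [List.cons_append, kepF, List.length_cons]
      rw [ih S c (by simpa using hc)]
      simp [Nat.succ_sub_succ]

lemma movF_append_le (K : Nat) : ∀ (P S : List Int) (c : Nat), P.length ≤ c →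
    movF K (P ++ S) c = movF K S (c - P.length) := by
  intro P
  induction P with
  | nil => intro S c _; simp
  | cons x P ih =>
    intro S c hc
    cases c with
    | zero => simp at hc
    | succ c =>
      simp only [List.cons_append, movF, List.length_cons]
      rw [ih S c (by simpa using hc)]
      simp [Nat.succ_sub_succ]

lemma kepF_split (K : Nat) (P : List Int) (x : Int) (S : List Int) :
    kepF K (P ++ x :: S) P.length = P ++ kepF K S (K - 1) := by
  rw [kepF_append_le K P (x :: S) P.length le_rfl]
  simp [kepF]

lemma movF_split (K : Nat) (P : List Int) (x : Int) (S : List Int) :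
    movF K (P ++ x :: S) P.length = x :: movF K S (K - 1) := by
  rw [movF_append_le K P (x :: S) P.length le_rfl]
  simp [movF]

-- A's loop computes kepF ++ (already-moved tail) ++ movF.
lemma loopA_eq (k n : Int) (hk : 2 ≤ k) :
    ∀ (fuel : Nat) (ys ms : List Int) (moved i : Int),
      n - moved = ys.length → 0 ≤ i → ys.length ≤ fuel →
      shuffleLoopA k n fuel (ys ++ ms) moved i =
        kepF k.toNat ys i.toNat ++ ms ++ movF k.toNat ys i.toNat := by
  intro fuel
  induction fuel with
  | zero =>
    intro ys ms moved i hlen _ hfuel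
    have : ys = [] := List.eq_nil_of_length_eq_zero (Nat.le_zero.mp hfuel)
    subst this
    simp [shuffleLoopA, kepF, movF]
  | succ fuel ih =>
    intro ys ms moved i hlen hi hfuel
    by_cases h : i < n - moved
    · -- pop lands inside ys
      have hj : i.toNat < ys.length := by omega
      have hj' : i.toNat < (ys ++ ms).length := by simp; omega
      have hi' : i = ((i.toNat : Nat) : Int) := by omega
      have hpop := PySem.List.pop?_natCast (xs := ys ++ ms) (n := i.toNat) hj'
      set j := i.toNat with hjdef
      have hget : (ys ++ ms)[j]'hj' = ys[j]'hj := List.getElem_append_left hj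
      have herase : (ys ++ ms).eraseIdx j = ys.eraseIdx j ++ ms :=
        List.eraseIdx_append_of_lt_length hj ms
      have hdecomp : ys = ys.take j ++ ys[j]'hj :: ys.drop (j + 1) := by
        conv_lhs => rw [← List.take_append_drop j ys]
        rw [List.getElem_cons_drop hj]
      have herase2 : ys.eraseIdx j = ys.take j ++ ys.drop (j + 1) :=
        List.eraseIdx_eq_take_drop_succ ys j
      have hlen' : n - (moved + 1) = ((ys.take j ++ ys.drop (j + 1)).length : Int) := by
        simp [List.length_take, List.length_drop]
        omega
      have hfuel' : (ys.take j ++ ys.drop (j + 1)).length ≤ fuel := by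
        simp [List.length_take, List.length_drop]
        omega
      have hi2 : (0 : Int) ≤ i + (k - 1) := by omega
      have step := ih (ys.take j ++ ys.drop (j + 1)) (ms ++ [ys[j]'hj]) (moved + 1)
        (i + (k - 1)) hlen' hi2 hfuel'
      have htn : (i + (k - 1)).toNat = j + (k.toNat - 1) := by omega
      have hlenTake : (ys.take j).length = j := by simp; omega
      have hle : (ys.take j).length ≤ (i + (k - 1)).toNat := by rw [hlenTake, htn]; omega
      have hsub : (i + (k - 1)).toNat - (ys.take j).length = k.toNat - 1 := by
        rw [hlenTake, htn]; omega
      rw [hi'] at step htn hle hsub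
      rw [shuffleLoopA, if_pos h, hi', hpop]
      simp only []
      rw [herase, herase2, hget, List.append_assoc (ys.take j ++ ys.drop (j+1)) ms _, step]
      rw [kepF_append_le _ _ _ _ hle, movF_append_le _ _ _ _ hle, hsub]
      have hs1 := kepF_split k.toNat (ys.take j) (ys[j]'hj) (ys.drop (j + 1))
      have hs2 := movF_split k.toNat (ys.take j) (ys[j]'hj) (ys.drop (j + 1))
      rw [hlenTake] at hs1 hs2
      rw [← hdecomp] at hs1 hs2
      rw [hs1, hs2]
      simp
    · -- loop exits: everything remaining is kept
      have hge : ys.length ≤ i.toNat := by omega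
      rw [shuffleLoopA, if_neg h, kepF_all _ _ _ hge, movF_all _ _ _ hge]
      simp

-- B's two enumerate-filter passes compute kepF and movF.
lemma filter_kept_eq (k : Int) (hk : 2 ≤ k) :
    ∀ (xs : List Int) (j : Nat),
      ((PySem.List.enumerate xs (j : Int)).filter
        (fun p => !(PySem.Int.mod (p.1 + 1) k == 0))).map Prod.snd =
        kepF k.toNat xs (k.toNat - 1 - j % k.toNat) := by
  intro xs
  induction xs with
  | nil => intro j; simp [PySem.List.enumerate_nil, kepF]
  | cons x xs ih =>
    intro j
    have hK : 2 ≤ k.toNat := by omega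
    have hcast : ((j : Int) + 1) = (((j + 1 : Nat) : Nat) : Int) := by push_cast; ring
    have hkc : k = ((k.toNat : Nat) : Int) := by omega
    have hmod : PySem.Int.mod ((j : Int) + 1) k = (((j + 1) % k.toNat : Nat) : Int) := by
      rw [hcast, hkc, PySem.Int.mod_natCast]; simp
    have hsucc : (j + 1) % k.toNat =
        (if j % k.toNat = k.toNat - 1 then 0 else j % k.toNat + 1) := by
      have h1 : (j + 1) % k.toNat = (j % k.toNat + 1) % k.toNat := by
        conv_lhs => rw [Nat.add_mod]
        rw [Nat.mod_eq_of_lt (show 1 < k.toNat by omega)]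
      have hlt : j % k.toNat < k.toNat := Nat.mod_lt _ (by omega)
      by_cases h2 : j % k.toNat = k.toNat - 1
      · rw [h1, h2, if_pos rfl]
        have : k.toNat - 1 + 1 = k.toNat := by omega
        rw [this, Nat.mod_self]
      · rw [h1, if_neg h2, Nat.mod_eq_of_lt (by omega)]
    rw [PySem.List.enumerate_cons]
    by_cases h2 : j % k.toNat = k.toNat - 1
    · have hz : (j + 1) % k.toNat = 0 := by rw [hsucc, if_pos h2]
      have hc : k.toNat - 1 - j % k.toNat = 0 := by omega
      have hcnext : k.toNat - 1 - (j + 1) % k.toNat = k.toNat - 1 := by rw [hz]; omega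
      have hb : (!(PySem.Int.mod ((j : Int) + 1) k == 0)) = false := by
        rw [hmod, hz]; simp
      rw [List.filter_cons]
      simp only [hb, if_false, Bool.false_eq_true]
      have h := ih (j + 1)
      push_cast at h ⊢
      rw [h, hcnext, hc]
      simp [kepF]
    · have hlt : j % k.toNat < k.toNat := Nat.mod_lt _ (by omega)
      have hnz : (j + 1) % k.toNat = j % k.toNat + 1 := by rw [hsucc, if_neg h2]
      have hb : (!(PySem.Int.mod ((j : Int) + 1) k == 0)) = true := by
        rw [hmod, hnz]
        have hne : ∀ m : Nat, ((m + 1 : Nat) : Int) ≠ 0 := by intro m; push_cast; omega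
        simpa using hne (j % k.toNat)
      rw [List.filter_cons]
      simp only [hb, if_true]
      have hc : k.toNat - 1 - j % k.toNat = (k.toNat - 1 - (j + 1) % k.toNat) + 1 := by
        rw [hnz]; omega
      have h := ih (j + 1)
      push_cast at h ⊢
      rw [List.map_cons, h, hc]
      simp [kepF]

lemma filter_moved_eq (k : Int) (hk : 2 ≤ k) :
    ∀ (xs : List Int) (j : Nat),
      ((PySem.List.enumerate xs (j : Int)).filter
        (fun p => (PySem.Int.mod (p.1 + 1) k == 0))).map Prod.snd =
        movF k.toNat xs (k.toNat - 1 - j % k.toNat) := by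
  intro xs
  induction xs with
  | nil => intro j; simp [PySem.List.enumerate_nil, movF]
  | cons x xs ih =>
    intro j
    have hK : 2 ≤ k.toNat := by omega
    have hcast : ((j : Int) + 1) = (((j + 1 : Nat) : Nat) : Int) := by push_cast; ring
    have hkc : k = ((k.toNat : Nat) : Int) := by omega
    have hmod : PySem.Int.mod ((j : Int) + 1) k = (((j + 1) % k.toNat : Nat) : Int) := by
      rw [hcast, hkc, PySem.Int.mod_natCast]; simp
    have hsucc : (j + 1) % k.toNat =
        (if j % k.toNat = k.toNat - 1 then 0 else j % k.toNat + 1) := by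
      have h1 : (j + 1) % k.toNat = (j % k.toNat + 1) % k.toNat := by
        conv_lhs => rw [Nat.add_mod]
        rw [Nat.mod_eq_of_lt (show 1 < k.toNat by omega)]
      have hlt : j % k.toNat < k.toNat := Nat.mod_lt _ (by omega)
      by_cases h2 : j % k.toNat = k.toNat - 1
      · rw [h1, h2, if_pos rfl]
        have : k.toNat - 1 + 1 = k.toNat := by omega
        rw [this, Nat.mod_self]
      · rw [h1, if_neg h2, Nat.mod_eq_of_lt (by omega)]
    rw [PySem.List.enumerate_cons]
    by_cases h2 : j % k.toNat = k.toNat - 1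
    · have hz : (j + 1) % k.toNat = 0 := by rw [hsucc, if_pos h2]
      have hc : k.toNat - 1 - j % k.toNat = 0 := by omega
      have hcnext : k.toNat - 1 - (j + 1) % k.toNat = k.toNat - 1 := by rw [hz]; omega
      have hb : ((PySem.Int.mod ((j : Int) + 1) k == 0)) = true := by
        rw [hmod, hz]; simp
      rw [List.filter_cons]
      simp only [hb, if_true]
      have h := ih (j + 1)
      push_cast at h ⊢
      rw [List.map_cons, h, hcnext, hc]
      simp [movF]
    · have hlt : j % k.toNat < k.toNat := Nat.mod_lt _ (by omega)
      have hnz : (j + 1) % k.toNat = j % k.toNat + 1 := by rw [hsucc, if_neg h2]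
      have hb : ((PySem.Int.mod ((j : Int) + 1) k == 0)) = false := by
        rw [hmod, hnz]
        have hne : ∀ m : Nat, ((m + 1 : Nat) : Int) ≠ 0 := by intro m; push_cast; omega
        simpa using hne (j % k.toNat)
      rw [List.filter_cons]
      simp only [hb, if_false, Bool.false_eq_true]
      have hc : k.toNat - 1 - j % k.toNat = (k.toNat - 1 - (j + 1) % k.toNat) + 1 := by
        rw [hnz]; omega
      have h := ih (j + 1)
      push_cast at h ⊢
      rw [h, hc]
      simp [movF]

-- ===== VERDICT (by name: the statement is the Claim_ definition above) =====
theorem shuffle_array_spec : Claim_equal_shuffle_array := by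
  intro nums k _
  unfold Spec_shuffle_array shuffle_array shuffle_array_alt
  by_cases hk : k ≤ 1
  · simp [hk]
  · have hk2 : 2 ≤ k := by omega
    simp only [hk, if_false, or_false]
    by_cases hn : (nums.length : Int) = 0
    · have : nums = [] := by
        cases nums with
        | nil => rfl
        | cons a l => exfalso; simp at hn; omega
      subst this
      simp [PySem.List.enumerate_nil]
    · simp only [hn, if_false]
      have hloop := loopA_eq k (nums.length : Int) hk2 (nums.length + 1) nums [] 0 (k - 1)
        (by simp) (by omega) (by omega)
      rw [show nums ++ ([] : List Int) = nums by simp] at hloop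
      rw [hloop]
      have h1 := filter_kept_eq k hk2 nums 0
      have h2 := filter_moved_eq k hk2 nums 0
      simp only [Nat.zero_mod, Nat.sub_zero, Nat.cast_zero] at h1 h2
      rw [h1, h2]
      have : (k - 1).toNat = k.toNat - 1 := by omega
      rw [this]
      simp
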